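-- pv_equiv track=rewrite | github.com/mgmk2/atcoder-python | ABC/126/d.py | dfs
-- ===== SOURCE A (Python) =====
-- def dfs(i, V, E):
--     for k in E[i].keys():
--         if V[k] >= 0:
--             continue
--         if E[i][k] % 2:
--             V[k] = 1 - V[i]
--         else:
--             V[k] = V[i]
--         V = dfs(k, V, E)
--     return V
-- ===== SOURCE B (Python) =====
-- def dfs(i, V, E):
--     stack = [(i, iter(E[i].keys()))]
--     while stack:
--         n, it = stack[-1]
--         for k in it:
--             if V[k] < 0:
--                 V[k] = 1 - V[n] if E[n][k] % 2 else V[n]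
--                 stack.append((k, iter(E[k].keys())))
--                 break
--         else:
--             stack.pop()
--     return V
-- ===== Notes on version B (the rewrite author's own statement) =====
-- stated objective: alternative
-- what changed: A's recursive DFS is replaced by an iterative DFS over an explicit stack of (node, key-iterator) frames that reproduces the recursion's exact pre-order colouring sequence and in-place mutation of V.
-- outside the precondition, e.g. on dfs(0, [2, -1], {0: {1: 1}, 1: {0: 1}}): A returns [2, -1], B returns [2, -1]; on dfs(0, [0, -1, 5], {0: {1: 1}, 1: {0: 2}, 2: {5: 1}}): A returns [0, 1, 5], B returns [0, 1, 5]
import Mathlib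
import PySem

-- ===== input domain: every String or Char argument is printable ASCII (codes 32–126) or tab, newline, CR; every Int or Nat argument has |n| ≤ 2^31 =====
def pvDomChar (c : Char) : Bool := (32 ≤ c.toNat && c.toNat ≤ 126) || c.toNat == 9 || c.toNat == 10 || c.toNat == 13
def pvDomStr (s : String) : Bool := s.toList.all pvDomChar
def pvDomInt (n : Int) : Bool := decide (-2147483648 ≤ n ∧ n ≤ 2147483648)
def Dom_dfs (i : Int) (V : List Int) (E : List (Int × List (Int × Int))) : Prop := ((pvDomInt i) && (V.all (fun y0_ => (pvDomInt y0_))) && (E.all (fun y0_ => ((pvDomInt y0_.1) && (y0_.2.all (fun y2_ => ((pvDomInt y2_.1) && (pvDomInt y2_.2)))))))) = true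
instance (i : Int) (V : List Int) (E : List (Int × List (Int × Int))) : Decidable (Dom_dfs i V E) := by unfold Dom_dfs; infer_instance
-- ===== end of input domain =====

-- B replaces A's recursive DFS by an explicit-stack iterative DFS (same colouring order, same
-- in-place mutation of V, equal return value); objective: alternative decomposition, no speed claim.

-- ===== PORT A =====
-- shared accessors for the dicts E and E[n] (dict → PySem.Dict; the lookups both Pythons perform)
def pvAdj (E : List (Int × List (Int × Int))) (n : Int) : List (Int × Int) :=
  (PySem.Dict.ofList E).getD n []
def pvKeys (E : List (Int × List (Int × Int))) (n : Int) : List Int :=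
  (PySem.Dict.ofList (pvAdj E n)).keys
def pvW (E : List (Int × List (Int × Int))) (n k : Int) : Int :=
  (PySem.Dict.ofList (pvAdj E n)).getD k 0
-- V[k] = 1 - V[n] if E[n][k] % 2 else V[n]  (the new colour written at k)
def pvColor (E : List (Int × List (Int × Int))) (V : List Int) (n k : Int) : Int :=
  if PySem.Int.mod (pvW E n k) 2 ≠ 0 then 1 - PySem.List.pyGetD V n 0 else PySem.List.pyGetD V n 0

-- A's recursion, fuelled for totality (fuel = recursion depth; under Pre_ it never runs out)
mutual
def dfsGo (E : List (Int × List (Int × Int))) : Nat → Int → List Int → List Int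
  | 0, _, V => V
  | f+1, i, V => dfsLoop E f i (pvKeys E i) V
termination_by f _ _ => (f, 0)
-- 'for k in E[i].keys(): …' of A, recursing over the remaining keys
def dfsLoop (E : List (Int × List (Int × Int))) : Nat → Int → List Int → List Int → List Int
  | _, _, [], V => V
  | f, n, k :: ks, V =>
    if 0 ≤ PySem.List.pyGetD V k 0 then dfsLoop E f n ks V
    else dfsLoop E f n ks (dfsGo E f k (PySem.List.pySetD V k (pvColor E V n k)))
termination_by f _ ks _ => (f, ks.length + 1)
end

def dfs (i : Int) (V : List Int) (E : List (Int × List (Int × Int))) : List Int :=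
  dfsGo E (V.length + 1) i V

-- ===== PORT B =====
-- Source B's while loop over an explicit stack of frames (node, remaining keys of its iterator);
-- fuel is consumed only when a frame is pushed (under Pre_ it never runs out)
def dfsMach (E : List (Int × List (Int × Int))) : Nat → List (Int × List Int) → List Int → List Int
  | _, [], V => V
  | f, (_, []) :: rest, V => dfsMach E f rest V
  | f, (n, k :: ks) :: rest, V =>
    if 0 ≤ PySem.List.pyGetD V k 0 then dfsMach E f ((n, ks) :: rest) V
    else match f with
      | 0 => V
      | f+1 => dfsMach E f ((k, pvKeys E k) :: (n, ks) :: rest) (PySem.List.pySetD V k (pvColor E V n k))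
termination_by f st _ => (f, (st.map (fun p => p.2.length + 1)).sum)

def dfs_alt (i : Int) (V : List Int) (E : List (Int × List (Int × Int))) : List Int :=
  dfsMach E ((V.length + 1) * (V.length + 1)) [(i, pvKeys E i)] V


-- ===== PRECONDITION & SPEC =====
-- Pre_ admits (first disjunct) any input whose root adjacency refers only to in-range,
-- already-coloured entries — the DFS then touches nothing — and (second disjunct) colouring runs
-- from a coloured root: stored values are colours (root entry in {0,1}), every listed neighbour
-- index is in range, and every neighbour still uncoloured (negative entry) is itself a key of E.
-- Excluded: inputs on which A raises (KeyError/IndexError on a reached missing key or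
-- out-of-range index, or unbounded recursion = RecursionError), and — because from non-colour
-- values the DFS can recolour entries negatively and recurse without bound, so termination is
-- not a closed-form condition — inputs that A happens to return on only because its recolouring
-- stops early although their values are not colours or their uncoloured neighbours are not keys.
def Pre_dfs (i : Int) (V : List Int) (E : List (Int × List (Int × Int))) : Prop :=
  ((PySem.Dict.ofList E).contains i = true ∧
    ∀ k ∈ pvKeys E i, PySem.Raise.InRange V.length k ∧ 0 ≤ PySem.List.pyGetD V k 0) ∨
  ((E.map Prod.fst).Nodup ∧ (∀ p ∈ E, (p.2.map Prod.fst).Nodup) ∧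
    i ∈ E.map Prod.fst ∧ 0 ≤ i ∧ i < (V.length : Int) ∧
    0 ≤ PySem.List.pyGetD V i 0 ∧ PySem.List.pyGetD V i 0 ≤ 1 ∧
    (∀ p ∈ E, ∀ q ∈ p.2, 0 ≤ q.1 ∧ q.1 < (V.length : Int) ∧
      (PySem.List.pyGetD V q.1 0 < 0 → q.1 ∈ E.map Prod.fst)))
instance (i : Int) (V : List Int) (E : List (Int × List (Int × Int))) : Decidable (Pre_dfs i V E) := by
  unfold Pre_dfs; infer_instance

def pvWitness_dfs : Int × List Int × (List (Int × List (Int × Int))) :=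
  (0, [0, -1, -1], [(0, [(1, 1), (2, 2)]), (1, [(0, 1)]), (2, [(0, 2)])])

def Spec_dfs (i : Int) (V : List Int) (E : List (Int × List (Int × Int))) (out : List Int) : Prop := out = dfs_alt i V E
instance (i : Int) (V : List Int) (E : List (Int × List (Int × Int))) (out : List Int) : Decidable (Spec_dfs i V E out) := by unfold Spec_dfs; infer_instance

-- ===== CLAIM (what is proved, stated in full; the proofs are below) =====
def Claim_equal_dfs : Prop := ∀ (i : Int) (V : List Int) (E : List (Int × List (Int × Int))), Dom_dfs i V E → Pre_dfs i V E → Spec_dfs i V E (dfs i V E)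

-- ===== LEMMAS AND PROOFS =====

-- invariants used only by the proofs:
-- negs = number of negative (uncoloured) entries; EVOK/KeysOK/NodeOK/StkOK = Pre_'s second
-- disjunct propagated to the nodes and key lists in flight; Pres V W = W is V after some
-- colourings (length kept, nonnegative entries kept, changed entries are colours in {0,1},
-- negatives not increased)
def negs (V : List Int) : Nat := V.countP (fun x => decide (x < 0))
def EVOK (E : List (Int × List (Int × Int))) (V : List Int) : Prop :=
  ∀ p ∈ E, ∀ q ∈ p.2, 0 ≤ q.1 ∧ q.1 < (V.length : Int) ∧
    (PySem.List.pyGetD V q.1 0 < 0 → q.1 ∈ E.map Prod.fst)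
def KeysOK (E : List (Int × List (Int × Int))) (V : List Int) (ks : List Int) : Prop :=
  ∀ k ∈ ks, 0 ≤ k ∧ k < (V.length : Int) ∧
    (PySem.List.pyGetD V k 0 < 0 → k ∈ E.map Prod.fst)
def NodeOK (E : List (Int × List (Int × Int))) (V : List Int) (n : Int) : Prop :=
  n ∈ E.map Prod.fst ∧ 0 ≤ n ∧ n < (V.length : Int) ∧
    0 ≤ PySem.List.pyGetD V n 0 ∧ PySem.List.pyGetD V n 0 ≤ 1
def StkOK (E : List (Int × List (Int × Int))) (V : List Int) (st : List (Int × List Int)) : Prop :=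
  ∀ fr ∈ st, NodeOK E V fr.1 ∧ KeysOK E V fr.2
def Pres (V W : List Int) : Prop :=
  W.length = V.length ∧ negs W ≤ negs V ∧
  ∀ j : Nat, j < V.length →
    (0 ≤ V.getD j 0 → W.getD j 0 = V.getD j 0) ∧
    (W.getD j 0 = V.getD j 0 ∨ (0 ≤ W.getD j 0 ∧ W.getD j 0 ≤ 1))

-- index bridges
theorem getI_canon (V : List Int) (n : Int) (h0 : 0 ≤ n) (h1 : n < (V.length : Int)) :
    PySem.List.pyGetD V n 0 = V.getD n.toNat 0 := by
  rw [PySem.List.pyGetD_eq_getElem V 0 h0 (by simpa using h1)]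
  rw [List.getD_eq_getElem _ _ (by omega)]

theorem setI_canon (V : List Int) (n : Int) (c : Int) (h0 : 0 ≤ n) :
    PySem.List.pySetD V n c = V.set n.toNat c := PySem.List.pySetD_of_nonneg V c h0

theorem getD_set_self (V : List Int) (j : Nat) (c : Int) (hj : j < V.length) :
    (V.set j c).getD j 0 = c := by
  rw [List.getD_eq_getElem _ _ (by simpa using hj)]
  exact List.getElem_set_self (by simpa using hj)

theorem getD_set_ne (V : List Int) (j m : Nat) (c : Int) (h : m ≠ j) :
    (V.set j c).getD m 0 = V.getD m 0 := by
  rw [List.getD_eq_getElem?_getD, List.getD_eq_getElem?_getD, List.getElem?_set_ne (by omega)]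

theorem negs_set_lt (V : List Int) (j : Nat) (c : Int) (hj : j < V.length)
    (hneg : V.getD j 0 < 0) (hc : 0 ≤ c) : negs (V.set j c) < negs V := by
  have hneg' : V[j] < 0 := by rwa [List.getD_eq_getElem _ _ hj] at hneg
  have h1 : V.set j c = V.take j ++ c :: V.drop (j+1) := List.set_eq_take_cons_drop c hj
  have h2 : V = V.take j ++ V[j] :: V.drop (j+1) := by
    conv_lhs => rw [← List.take_append_drop j V]
    rw [List.drop_eq_getElem_cons hj]
  have e1 : (decide (c < 0)) = false := by simp [not_lt.mpr hc]
  have e2 : (decide (V[j] < 0)) = true := by simp [hneg']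
  unfold negs
  rw [h1, List.countP_append, List.countP_cons, e1]
  conv_rhs => rw [h2, List.countP_append, List.countP_cons, e2]
  norm_num

theorem one_le_negs (V : List Int) (k : Int) (h0 : 0 ≤ k) (h1 : k < (V.length : Int))
    (hneg : PySem.List.pyGetD V k 0 < 0) : 1 ≤ negs V := by
  rw [getI_canon V k h0 h1, List.getD_eq_getElem _ _ (by omega)] at hneg
  have hmem : V[k.toNat] ∈ V.filter (fun x => decide (x < 0)) :=
    List.mem_filter.mpr ⟨List.getElem_mem _, by simpa using hneg⟩
  have : 0 < V.countP (fun x => decide (x < 0)) := by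
    rw [List.countP_eq_length_filter]
    exact List.length_pos_of_mem hmem
  simpa [negs] using this

theorem negs_lt_len (V : List Int) (i : Int) (h0 : 0 ≤ i) (h1 : i < (V.length : Int))
    (hpos : 0 ≤ PySem.List.pyGetD V i 0) : negs V < V.length := by
  rw [getI_canon V i h0 h1, List.getD_eq_getElem _ _ (by omega)] at hpos
  rcases Nat.lt_or_ge (negs V) V.length with h | h
  · exact h
  · exfalso
    have hle : V.countP (fun x => decide (x < 0)) ≤ V.length := List.countP_le_length
    have heq : V.countP (fun x => decide (x < 0)) = V.length := le_antisymm hle (by simpa [negs] using h)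
    have := (List.countP_eq_length).mp heq V[i.toNat] (List.getElem_mem _)
    simp at this; omega

-- Pres machinery
theorem presRefl (V : List Int) : Pres V V := ⟨rfl, le_refl _, fun _ _ => ⟨fun _ => rfl, Or.inl rfl⟩⟩

theorem presTrans {V W X : List Int} (h1 : Pres V W) (h2 : Pres W X) : Pres V X := by
  obtain ⟨l1, n1, p1⟩ := h1; obtain ⟨l2, n2, p2⟩ := h2
  refine ⟨l2.trans l1, n2.trans n1, fun j hj => ?_⟩
  have hj2 : j < W.length := by omega
  obtain ⟨a1, b1⟩ := p1 j hj
  obtain ⟨a2, b2⟩ := p2 j hj2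
  constructor
  · intro hv
    rw [a2 (by rw [a1 hv]; exact hv), a1 hv]
  · rcases b2 with h | h
    · rw [h]; exact b1
    · exact Or.inr h

theorem presSet (V : List Int) (k c : Int) (h0 : 0 ≤ k) (h1 : k < (V.length : Int))
    (hneg : PySem.List.pyGetD V k 0 < 0) (hc0 : 0 ≤ c) (hc1 : c ≤ 1) :
    Pres V (PySem.List.pySetD V k c) ∧ negs (PySem.List.pySetD V k c) < negs V := by
  rw [setI_canon V k c h0]
  have hk : k.toNat < V.length := by omega
  have hnegD : V.getD k.toNat 0 < 0 := by rwa [getI_canon V k h0 h1] at hneg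
  have hlt := negs_set_lt V k.toNat c hk hnegD hc0
  refine ⟨⟨by simp, le_of_lt hlt, fun j hj => ?_⟩, hlt⟩
  by_cases hjk : j = k.toNat
  · rw [hjk, getD_set_self V k.toNat c hk]
    rw [hjk] at hj
    exact ⟨fun hv => absurd hv (by omega), Or.inr ⟨hc0, hc1⟩⟩
  · rw [getD_set_ne V k.toNat j c hjk]
    exact ⟨fun _ => rfl, Or.inl rfl⟩

theorem getI_pres {V W : List Int} (hp : Pres V W) (n : Int) (h0 : 0 ≤ n)
    (h1 : n < (V.length : Int)) (hv : 0 ≤ PySem.List.pyGetD V n 0) :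
    PySem.List.pyGetD W n 0 = PySem.List.pyGetD V n 0 := by
  have hl : W.length = V.length := hp.1
  rw [getI_canon V n h0 h1] at hv ⊢
  rw [getI_canon W n h0 (by omega)]
  exact (hp.2.2 n.toNat (by omega)).1 hv

theorem getI_neg_pres {V W : List Int} (hp : Pres V W) (n : Int) (h0 : 0 ≤ n)
    (h1 : n < (V.length : Int)) (hv : PySem.List.pyGetD W n 0 < 0) :
    PySem.List.pyGetD V n 0 < 0 := by
  by_contra h
  rw [getI_pres hp n h0 h1 (by omega)] at hv
  omega

theorem evok_pres {E : List (Int × List (Int × Int))} {V W : List Int}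
    (hE : EVOK E V) (hp : Pres V W) : EVOK E W := by
  intro p hp' q hq
  obtain ⟨a, b, c⟩ := hE p hp' q hq
  exact ⟨a, by rw [hp.1]; exact b, fun hneg => c (getI_neg_pres hp q.1 a b hneg)⟩

theorem keysok_pres {E : List (Int × List (Int × Int))} {V W : List Int} {ks : List Int}
    (hks : KeysOK E V ks) (hp : Pres V W) : KeysOK E W ks := by
  intro k hk
  obtain ⟨a, b, c⟩ := hks k hk
  exact ⟨a, by rw [hp.1]; exact b, fun hneg => c (getI_neg_pres hp k a b hneg)⟩

theorem nodeok_pres {E : List (Int × List (Int × Int))} {V W : List Int} {n : Int}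
    (hn : NodeOK E V n) (hp : Pres V W) : NodeOK E W n := by
  obtain ⟨a, b, c, d, e⟩ := hn
  have hv := getI_pres hp n b c d
  exact ⟨a, b, by rw [hp.1]; exact c, by rw [hv]; exact d, by rw [hv]; exact e⟩

theorem stkok_pres {E : List (Int × List (Int × Int))} {V W : List Int}
    {st : List (Int × List Int)} (hst : StkOK E V st) (hp : Pres V W) :
    StkOK E W st := fun fr hfr => ⟨nodeok_pres (hst fr hfr).1 hp, keysok_pres (hst fr hfr).2 hp⟩

-- dict lemmas
theorem ofList_items_nodup {α β : Type} [BEq α] [LawfulBEq α] (l : List (α × β))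
    (h : (l.map Prod.fst).Nodup) : (PySem.Dict.ofList l).items = l := by
  have := PySem.Dict.items_foldl_insert_fresh (l := l) (k := Prod.fst) (v := Prod.snd)
    (d := PySem.Dict.empty) (by intro a _; rfl) h
  simpa using this

theorem keys_ofList_nodup {α β : Type} [BEq α] [LawfulBEq α] (l : List (α × β))
    (h : (l.map Prod.fst).Nodup) : (PySem.Dict.ofList l).keys = l.map Prod.fst := by
  have := ofList_items_nodup l h
  simp [PySem.Dict.keys, this]

theorem pvAdj_eq {E : List (Int × List (Int × Int))} (hnd1 : (E.map Prod.fst).Nodup)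
    {p : Int × List (Int × Int)} (hp : p ∈ E) : pvAdj E p.1 = p.2 := by
  unfold pvAdj
  have hi : (PySem.Dict.ofList E).items = E := ofList_items_nodup E hnd1
  have hk : (PySem.Dict.ofList E).keys.Nodup := by
    rw [keys_ofList_nodup E hnd1]; exact hnd1
  exact PySem.Dict.getD_of_mem_items (PySem.Dict.ofList E) (by rw [hi]; simpa using hp) hk []

theorem pvKeys_keysok {E : List (Int × List (Int × Int))} {V : List Int}
    (hnd1 : (E.map Prod.fst).Nodup) (hnd2 : ∀ p ∈ E, (p.2.map Prod.fst).Nodup)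
    (hE : EVOK E V) {n : Int} (hn : n ∈ E.map Prod.fst) : KeysOK E V (pvKeys E n) := by
  obtain ⟨p, hp, rfl⟩ := List.mem_map.mp hn
  intro k hk
  unfold pvKeys at hk
  rw [pvAdj_eq hnd1 hp, keys_ofList_nodup p.2 (hnd2 p hp)] at hk
  obtain ⟨q, hq, rfl⟩ := List.mem_map.mp hk
  exact hE p hp q hq

theorem color_bounds {E : List (Int × List (Int × Int))} {V : List Int} {n : Int} (k : Int)
    (h0 : 0 ≤ PySem.List.pyGetD V n 0) (h1 : PySem.List.pyGetD V n 0 ≤ 1) :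
    0 ≤ pvColor E V n k ∧ pvColor E V n k ≤ 1 := by
  unfold pvColor; split <;> omega

-- unfolding equations
theorem go_succ (E : List (Int × List (Int × Int))) (f : Nat) (i : Int) (V : List Int) :
    dfsGo E (f+1) i V = dfsLoop E f i (pvKeys E i) V := by rw [dfsGo]

theorem loop_nil (E : List (Int × List (Int × Int))) (f : Nat) (n : Int) (V : List Int) :
    dfsLoop E f n [] V = V := by rw [dfsLoop]

theorem loop_vis {V : List Int} {k : Int} (h : 0 ≤ PySem.List.pyGetD V k 0)
    (E : List (Int × List (Int × Int))) (f : Nat) (n : Int) (ks : List Int) :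
    dfsLoop E f n (k :: ks) V = dfsLoop E f n ks V := by rw [dfsLoop]; simp [h]

theorem loop_col {V : List Int} {k : Int} (h : ¬ 0 ≤ PySem.List.pyGetD V k 0)
    (E : List (Int × List (Int × Int))) (f : Nat) (n : Int) (ks : List Int) :
    dfsLoop E f n (k :: ks) V =
      dfsLoop E f n ks (dfsGo E f k (PySem.List.pySetD V k (pvColor E V n k))) := by
  rw [dfsLoop]; simp [h]

theorem mach_nil (E : List (Int × List (Int × Int))) (f : Nat) (V : List Int) :
    dfsMach E f [] V = V := by rw [dfsMach]

theorem mach_pop (E : List (Int × List (Int × Int))) (f : Nat) (n : Int)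
    (rest : List (Int × List Int)) (V : List Int) :
    dfsMach E f ((n, []) :: rest) V = dfsMach E f rest V := by rw [dfsMach]

theorem mach_vis {V : List Int} {k : Int} (h : 0 ≤ PySem.List.pyGetD V k 0)
    (E : List (Int × List (Int × Int))) (f : Nat) (n : Int) (ks : List Int)
    (rest : List (Int × List Int)) :
    dfsMach E f ((n, k :: ks) :: rest) V = dfsMach E f ((n, ks) :: rest) V := by
  rw [dfsMach.eq_def]; simp [h]

theorem mach_col {V : List Int} {k : Int} (h : ¬ 0 ≤ PySem.List.pyGetD V k 0)
    (E : List (Int × List (Int × Int))) (f : Nat) (n : Int) (ks : List Int)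
    (rest : List (Int × List Int)) :
    dfsMach E (f+1) ((n, k :: ks) :: rest) V =
      dfsMach E f ((k, pvKeys E k) :: (n, ks) :: rest) (PySem.List.pySetD V k (pvColor E V n k)) := by
  rw [dfsMach.eq_def]; simp [h]

theorem main_sim (E : List (Int × List (Int × Int))) (hnd1 : (E.map Prod.fst).Nodup)
    (hnd2 : ∀ p ∈ E, (p.2.map Prod.fst).Nodup) : ∀ m : Nat,
    (∀ ks n f V, negs V ≤ m → EVOK E V → NodeOK E V n → KeysOK E V ks → negs V < f →
       Pres V (dfsLoop E f n ks V)) ∧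
    (∀ ks n rest f g V, negs V ≤ m → EVOK E V → NodeOK E V n → KeysOK E V ks → StkOK E V rest →
       negs V < f → negs V < g →
       dfsMach E f ((n, ks) :: rest) V = dfsMach E f rest (dfsLoop E g n ks V)) ∧
    (∀ st V, negs V ≤ m → EVOK E V → StkOK E V st → ∀ f g, negs V < f → negs V < g →
       dfsMach E f st V = dfsMach E g st V) := by
  intro m
  induction m using Nat.strong_induction_on with
  | _ m IH =>
  have L : ∀ ks n f V, negs V ≤ m → EVOK E V → NodeOK E V n → KeysOK E V ks → negs V < f →
      Pres V (dfsLoop E f n ks V) := by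
    intro ks
    induction ks with
    | nil =>
      intro n f V _ _ _ _ _
      rw [loop_nil]; exact presRefl V
    | cons k ks ih =>
      intro n f V hm hE hn hks hf
      by_cases hv : 0 ≤ PySem.List.pyGetD V k 0
      · rw [loop_vis hv]
        exact ih n f V hm hE hn (fun x hx => hks x (List.mem_cons_of_mem _ hx)) hf
      · rw [loop_col hv]
        have hneg : PySem.List.pyGetD V k 0 < 0 := not_le.mp hv
        obtain ⟨hk0, hk1, hkm⟩ := hks k List.mem_cons_self
        have hkkey : k ∈ E.map Prod.fst := hkm hneg
        obtain ⟨hc0, hc1⟩ := color_bounds (E := E) (V := V) (n := n) k hn.2.2.2.1 hn.2.2.2.2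
        obtain ⟨hp1, hlt1⟩ := presSet V k (pvColor E V n k) hk0 hk1 hneg hc0 hc1
        set V1 := PySem.List.pySetD V k (pvColor E V n k) with hV1
        have hm1 : 1 ≤ negs V := one_le_negs V k hk0 hk1 hneg
        obtain ⟨f', rfl⟩ := Nat.exists_eq_succ_of_ne_zero (show f ≠ 0 by omega)
        rw [go_succ]
        have hE1 : EVOK E V1 := evok_pres hE hp1
        have hn1k : NodeOK E V1 k := by
          refine ⟨hkkey, hk0, by rw [hp1.1]; exact hk1, ?_, ?_⟩ <;>
          · rw [hV1, setI_canon V k _ hk0, getI_canon _ k hk0 (by simp; omega),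
              getD_set_self V k.toNat _ (by omega)]
            omega
        have IHL := (IH (m-1) (by omega)).1
        have hp2 := IHL (pvKeys E k) k f' V1 (by omega) hE1 hn1k
          (pvKeys_keysok hnd1 hnd2 hE1 hkkey) (by omega)
        set V2 := dfsLoop E f' k (pvKeys E k) V1 with hV2
        have hpV2 : Pres V V2 := presTrans hp1 hp2
        have hp3 := ih n (f'+1) V2 (by have := hp2.2.1; omega) (evok_pres hE1 hp2)
          (nodeok_pres hn hpV2)
          (keysok_pres (fun x hx => hks x (List.mem_cons_of_mem _ hx)) hpV2)
          (by have := hp2.2.1; omega)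
        exact presTrans hpV2 hp3
  have M : ∀ ks n rest f g V, negs V ≤ m → EVOK E V → NodeOK E V n → KeysOK E V ks →
      StkOK E V rest → negs V < f → negs V < g →
      dfsMach E f ((n, ks) :: rest) V = dfsMach E f rest (dfsLoop E g n ks V) := by
    intro ks
    induction ks with
    | nil =>
      intro n rest f g V _ _ _ _ _ _ _
      rw [mach_pop, loop_nil]
    | cons k ks ih =>
      intro n rest f g V hm hE hn hks hst hf hg
      by_cases hv : 0 ≤ PySem.List.pyGetD V k 0
      · rw [mach_vis hv, loop_vis hv]
        exact ih n rest f g V hm hE hn (fun x hx => hks x (List.mem_cons_of_mem _ hx)) hst hf hg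
      · have hneg : PySem.List.pyGetD V k 0 < 0 := not_le.mp hv
        obtain ⟨hk0, hk1, hkm⟩ := hks k List.mem_cons_self
        have hkkey : k ∈ E.map Prod.fst := hkm hneg
        obtain ⟨hc0, hc1⟩ := color_bounds (E := E) (V := V) (n := n) k hn.2.2.2.1 hn.2.2.2.2
        obtain ⟨hp1, hlt1⟩ := presSet V k (pvColor E V n k) hk0 hk1 hneg hc0 hc1
        set V1 := PySem.List.pySetD V k (pvColor E V n k) with hV1
        have hm1 : 1 ≤ negs V := one_le_negs V k hk0 hk1 hneg
        obtain ⟨f', rfl⟩ := Nat.exists_eq_succ_of_ne_zero (show f ≠ 0 by omega)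
        obtain ⟨g', rfl⟩ := Nat.exists_eq_succ_of_ne_zero (show g ≠ 0 by omega)
        rw [mach_col hv, loop_col hv, go_succ]
        have hE1 : EVOK E V1 := evok_pres hE hp1
        have hn1k : NodeOK E V1 k := by
          refine ⟨hkkey, hk0, by rw [hp1.1]; exact hk1, ?_, ?_⟩ <;>
          · rw [hV1, setI_canon V k _ hk0, getI_canon _ k hk0 (by simp; omega),
              getD_set_self V k.toNat _ (by omega)]
            omega
        have hkeysk := pvKeys_keysok hnd1 hnd2 hE1 hkkey
        have hkstail : KeysOK E V1 ks :=
          keysok_pres (fun x hx => hks x (List.mem_cons_of_mem _ hx)) hp1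
        have hst1 : StkOK E V1 ((n, ks) :: rest) := by
          intro fr hfr
          rcases List.mem_cons.mp hfr with h | h
          · subst h; exact ⟨nodeok_pres hn hp1, hkstail⟩
          · exact ⟨nodeok_pres ((hst fr h).1) hp1, keysok_pres (hst fr h).2 hp1⟩
        obtain ⟨IHL, IHM, IHS⟩ := IH (m-1) (by omega)
        -- step 1: run the pushed frame to completion
        have step1 := IHM (pvKeys E k) k ((n, ks) :: rest) f' g' V1 (by omega) hE1 hn1k hkeysk
          hst1 (by omega) (by omega)
        have hp2 := IHL (pvKeys E k) k g' V1 (by omega) hE1 hn1k hkeysk (by omega)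
        set V2 := dfsLoop E g' k (pvKeys E k) V1 with hV2
        have hpV2 : Pres V V2 := presTrans hp1 hp2
        have hE2 : EVOK E V2 := evok_pres hE hpV2
        have hm2 : negs V2 ≤ m - 1 := by have := hp2.2.1; omega
        have hst2 : StkOK E V2 rest := stkok_pres hst hpV2
        have hks2 : KeysOK E V2 ks :=
          keysok_pres (fun x hx => hks x (List.mem_cons_of_mem _ hx)) hpV2
        -- step 2: finish the parent frame
        have step2 := IHM ks n rest f' (g'+1) V2 hm2 hE2 (nodeok_pres hn hpV2) hks2
          hst2 (by have := hp2.2.1; omega) (by have := hp2.2.1; omega)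
        have hp3 := IHL ks n (g'+1) V2 hm2 hE2 (nodeok_pres hn hpV2) hks2
          (by have := hp2.2.1; omega)
        set W := dfsLoop E (g'+1) n ks V2 with hW
        -- step 3: the leftover fuel difference does not matter
        have step3 := IHS rest W (by have := hp2.2.1; have := hp3.2.1; omega)
          (evok_pres hE2 hp3) (stkok_pres hst2 hp3) f' (f'+1)
          (by have := hp2.2.1; have := hp3.2.1; omega)
          (by have := hp2.2.1; have := hp3.2.1; omega)
        rw [step1, step2, step3]
  have S : ∀ st V, negs V ≤ m → EVOK E V → StkOK E V st → ∀ f g, negs V < f → negs V < g →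
      dfsMach E f st V = dfsMach E g st V := by
    intro st
    induction st with
    | nil => intro V _ _ _ f g _ _; rw [mach_nil, mach_nil]
    | cons fr rest ih =>
      intro V hm hE hst f g hf hg
      obtain ⟨n, ks⟩ := fr
      have hn : NodeOK E V n := (hst _ List.mem_cons_self).1
      have hks : KeysOK E V ks := (hst _ List.mem_cons_self).2
      have hrest : StkOK E V rest := fun x hx => hst x (List.mem_cons_of_mem _ hx)
      have e1 := M ks n rest f (m+1) V hm hE hn hks hrest hf (by omega)
      have e2 := M ks n rest g (m+1) V hm hE hn hks hrest hg (by omega)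
      have hp := L ks n (m+1) V hm hE hn hks (by omega)
      set W := dfsLoop E (m+1) n ks V with hW
      have := ih W (by have := hp.2.1; omega) (evok_pres hE hp) (stkok_pres hrest hp)
        f g (by have := hp.2.1; omega) (by have := hp.2.1; omega)
      rw [e1, e2, this]
  exact ⟨L, M, S⟩

-- the no-recolouring case: every key of E[i] already holds a nonnegative value
theorem loop_allvis (E : List (Int × List (Int × Int))) (f : Nat) (n : Int) (ks : List Int)
    (V : List Int) (h : ∀ k ∈ ks, 0 ≤ PySem.List.pyGetD V k 0) : dfsLoop E f n ks V = V := by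
  induction ks with
  | nil => exact loop_nil E f n V
  | cons k ks ih =>
    rw [loop_vis (h k List.mem_cons_self)]
    exact ih (fun x hx => h x (List.mem_cons_of_mem _ hx))

theorem mach_allvis (E : List (Int × List (Int × Int))) (f : Nat) (n : Int) (ks : List Int)
    (V : List Int) (h : ∀ k ∈ ks, 0 ≤ PySem.List.pyGetD V k 0) :
    dfsMach E f [(n, ks)] V = V := by
  induction ks with
  | nil => rw [mach_pop, mach_nil]
  | cons k ks ih =>
    rw [mach_vis (h k List.mem_cons_self)]
    exact ih (fun x hx => h x (List.mem_cons_of_mem _ hx))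

-- ===== VERDICT (by name: the statement is the Claim_ definition above) =====
theorem dfs_spec : Claim_equal_dfs := by
  intro i V E _hdom hpre
  show dfs i V E = dfs_alt i V E
  rcases hpre with ⟨_, hvis⟩ | ⟨hnd1, hnd2, hikey, hi0, hi1, hv0, hv1, hE⟩
  · unfold dfs dfs_alt
    rw [go_succ, loop_allvis E _ i _ V (fun k hk => (hvis k hk).2),
      mach_allvis E _ i _ V (fun k hk => (hvis k hk).2)]
  · have hlen : negs V < V.length := negs_lt_len V i hi0 hi1 hv0
    obtain ⟨_, M, _⟩ := main_sim E hnd1 hnd2 (negs V)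
    unfold dfs dfs_alt
    rw [go_succ]
    have hfuel : V.length + 1 ≤ (V.length + 1) * (V.length + 1) :=
      Nat.le_mul_of_pos_left _ (by omega)
    have e := M (pvKeys E i) i [] ((V.length+1)*(V.length+1)) V.length V (le_refl _) hE
      ⟨hikey, hi0, hi1, hv0, hv1⟩ (pvKeys_keysok hnd1 hnd2 hE hikey)
      (fun fr hfr => absurd hfr (List.not_mem_nil)) (by omega) (by omega)
    rw [e, mach_nil]
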